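-- pv_equiv track=rewrite | github.com/yasmeen1995/CodingNinjas_Python | 2DArrays/printSineWave.py | print_sine_wave
-- ===== SOURCE A (Python) =====
-- def print_sine_wave(matrix, n, m):
--     ans = []
--     for col in range(0, m):
--         if col % 2==0 :
--             #even: top to bottom:
--             for row in range(0, n):
--                 ans.append(matrix[row][col])
--         else:
--             # Odd: Bottom to Top
--             for row in range(n-1, -1, -1):
--                 ans.append(matrix[row][col])
--
--     return ans
-- ===== SOURCE B (Python) =====
-- def print_sine_wave(matrix, n, m):
--     if n <= 0 or m <= 0:
--         return []
--     cols = [[] for _ in range(m)]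
--     for r in range(n):
--         for c in range(m):
--             if c % 2 == 0:
--                 cols[c].append(matrix[r][c])
--             else:
--                 cols[c].insert(0, matrix[r][c])
--     ans = []
--     for col in cols:
--         ans += col
--     return ans
-- ===== Notes on version B (the rewrite author's own statement) =====
-- stated objective: alternative
-- what changed: Replaces A's column-major pair of mirror-image directional inner loops by a single row-major pass that distributes each row's entries into per-column accumulators (append for even columns, prepend for odd) and then concatenates the accumulators.
import Mathlib
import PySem

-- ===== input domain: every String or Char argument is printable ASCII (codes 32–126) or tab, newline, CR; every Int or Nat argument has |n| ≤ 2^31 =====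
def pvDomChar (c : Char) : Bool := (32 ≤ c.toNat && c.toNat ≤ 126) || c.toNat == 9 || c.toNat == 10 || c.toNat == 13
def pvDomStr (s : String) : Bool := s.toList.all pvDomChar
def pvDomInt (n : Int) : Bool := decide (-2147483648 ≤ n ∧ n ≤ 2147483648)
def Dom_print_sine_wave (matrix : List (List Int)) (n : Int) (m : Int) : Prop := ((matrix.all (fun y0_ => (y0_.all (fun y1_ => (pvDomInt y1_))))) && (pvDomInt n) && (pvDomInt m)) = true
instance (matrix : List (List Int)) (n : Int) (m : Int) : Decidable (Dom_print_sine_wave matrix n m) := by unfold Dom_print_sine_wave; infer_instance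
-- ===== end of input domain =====

-- B replaces A's column-major pair of mirror-image directional loops by one
-- row-major pass distributing entries into per-column accumulators (append for
-- even columns, prepend for odd), then concatenating them (alternative, same cost).

-- ===== PORT A =====
def print_sine_wave (matrix : List (List Int)) (n : Int) (m : Int) : List Int :=
  (PySem.List.pyRange 0 m 1).foldl (fun ans col =>
    if PySem.Int.mod col 2 = 0 then
      -- even: top to bottom
      (PySem.List.pyRange 0 n 1).foldl (fun ans row =>
        ans ++ [PySem.List.pyGetD (PySem.List.pyGetD matrix row []) col 0]) ans
    else
      -- odd: bottom to top
      (PySem.List.pyRange (n-1) (-1) (-1)).foldl (fun ans row =>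
        ans ++ [PySem.List.pyGetD (PySem.List.pyGetD matrix row []) col 0]) ans) []

-- ===== PORT B =====
-- hand port of cols[c].append(x) / cols[c].insert(0, x): List.modify at index c.toNat,
-- exact because c comes from range(m) so 0 ≤ c < m = len(cols)
def print_sine_wave_alt (matrix : List (List Int)) (n : Int) (m : Int) : List Int :=
  if n ≤ 0 ∨ m ≤ 0 then [] else
  let cols0 : List (List Int) := (PySem.List.pyRange 0 m 1).map (fun _ => [])
  let cols :=
    (PySem.List.pyRange 0 n 1).foldl (fun cols r =>
      (PySem.List.pyRange 0 m 1).foldl (fun cols c =>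
        cols.modify c.toNat (fun l =>
          if PySem.Int.mod c 2 = 0 then
            l ++ [PySem.List.pyGetD (PySem.List.pyGetD matrix r []) c 0]
          else
            PySem.List.pyGetD (PySem.List.pyGetD matrix r []) c 0 :: l)) cols) cols0
  cols.foldl (fun ans col => ans ++ col) []

-- ===== PRECONDITION & SPEC =====
-- Pre_ excludes exactly the inputs on which Python A raises IndexError: with n,m > 0
-- it reads matrix[row][col] for every row < n, col < m.
def Pre_print_sine_wave (matrix : List (List Int)) (n : Int) (m : Int) : Prop :=
  0 < n → 0 < m → (n ≤ (matrix.length : Int) ∧ ∀ row ∈ matrix.take n.toNat, m ≤ (row.length : Int))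
instance (matrix : List (List Int)) (n : Int) (m : Int) : Decidable (Pre_print_sine_wave matrix n m) := by unfold Pre_print_sine_wave; infer_instance
def pvWitness_print_sine_wave : List (List Int) × Int × Int := ([[1, 2], [3, 4]], 2, 2)

def Spec_print_sine_wave (matrix : List (List Int)) (n : Int) (m : Int) (out : List Int) : Prop := out = print_sine_wave_alt matrix n m
instance (matrix : List (List Int)) (n : Int) (m : Int) (out : List Int) : Decidable (Spec_print_sine_wave matrix n m out) := by unfold Spec_print_sine_wave; infer_instance

-- ===== CLAIM (what is proved, stated in full; the proofs are below) =====
def Claim_equal_print_sine_wave : Prop := ∀ (matrix : List (List Int)) (n : Int) (m : Int), Dom_print_sine_wave matrix n m → Pre_print_sine_wave matrix n m → Spec_print_sine_wave matrix n m (print_sine_wave matrix n m)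

-- ===== LEMMAS AND PROOFS =====

def pvG (matrix : List (List Int)) (c r : Nat) : Int :=
  PySem.List.pyGetD (PySem.List.pyGetD matrix (r : Int) []) (c : Int) 0

def pvCanon (matrix : List (List Int)) (N M : Nat) : List Int :=
  (List.range M).flatMap (fun c =>
    if c % 2 = 0 then List.map (fun r => pvG matrix c r) (List.range N)
    else List.map (fun r => pvG matrix c (N - 1 - r)) (List.range N))

lemma pvRangeZero (n : Int) :
    PySem.List.pyRange 0 n 1 = List.map (fun k : Nat => (k : Int)) (List.range n.toNat) := by
  rcases n with n | n
  · exact PySem.List.pyRange_zero_natCast n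
  · rw [PySem.List.pyRange_one_eq_nil (by omega)]
    simp

lemma pvRevRange (n : Nat) : (List.range n).reverse = (List.range n).map (fun i => n - 1 - i) := by
  simp [List.range_eq_range', List.reverse_range']

lemma pvA_eq (matrix : List (List Int)) (n m : Int) :
    print_sine_wave matrix n m = pvCanon matrix n.toNat m.toNat := by
  unfold print_sine_wave pvCanon
  have hbody : ∀ (ans : List Int) (col : Int),
      (if PySem.Int.mod col 2 = 0 then
        (PySem.List.pyRange 0 n 1).foldl (fun ans row =>
          ans ++ [PySem.List.pyGetD (PySem.List.pyGetD matrix row []) col 0]) ans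
      else
        (PySem.List.pyRange (n-1) (-1) (-1)).foldl (fun ans row =>
          ans ++ [PySem.List.pyGetD (PySem.List.pyGetD matrix row []) col 0]) ans)
      = ans ++ (if PySem.Int.mod col 2 = 0 then
          (PySem.List.pyRange 0 n 1).map (fun row => PySem.List.pyGetD (PySem.List.pyGetD matrix row []) col 0)
        else
          (PySem.List.pyRange (n-1) (-1) (-1)).map (fun row => PySem.List.pyGetD (PySem.List.pyGetD matrix row []) col 0)) := by
    intro ans col
    split <;> rw [PySem.List.foldl_append_singleton_eq_map]
  simp only [hbody]
  rw [PySem.List.foldl_append_eq_flatMap, List.nil_append]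
  rw [pvRangeZero m, List.flatMap_map]
  apply List.flatMap_congr
  intro c _
  have h0 : ((-1 : Int) + 1) = 0 := by norm_num
  have hn : (n - 1 + 1 : Int) = n := by ring
  by_cases hc : c % 2 = 0
  · have hcI : PySem.Int.mod (↑c) 2 = 0 := by
      rw [show (2:Int) = ((2:Nat):Int) by norm_num, PySem.Int.mod_natCast]
      exact_mod_cast hc
    rw [if_pos hcI, if_pos hc, pvRangeZero n, List.map_map]
    simp [pvG, Function.comp]
  · have hcI : ¬ PySem.Int.mod (↑c) 2 = 0 := by
      rw [show (2:Int) = ((2:Nat):Int) by norm_num, PySem.Int.mod_natCast]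
      exact_mod_cast hc
    rw [if_neg hcI, if_neg hc, PySem.List.pyRange_neg_one_eq_reverse, h0, hn,
      pvRangeZero n, ← List.map_reverse, pvRevRange, List.map_map, List.map_map]
    simp [pvG, Function.comp]

-- one Python element-update step of B's inner loop, at column c for row r
def pvUpd (matrix : List (List Int)) (r c : Nat) (l : List Int) : List Int :=
  if c % 2 = 0 then l ++ [pvG matrix c r] else pvG matrix c r :: l

-- the per-column accumulator after the first r rows have been distributed
def pvCol (matrix : List (List Int)) (r c : Nat) : List Int :=
  if c % 2 = 0 then (List.range r).map (fun i => pvG matrix c i)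
  else ((List.range r).map (fun i => pvG matrix c i)).reverse

lemma pvModifyMapRange (N i : Nat) (g : Nat → List Int) (f : List Int → List Int) :
    ((List.range N).map g).modify i f
      = (List.range N).map (fun c => if c = i then f (g c) else g c) := by
  apply List.ext_getElem
  · simp [List.length_modify]
  · intro k hk hk'
    simp only [List.getElem_modify, List.getElem_map, List.getElem_range]
    by_cases h : k = i
    · simp [h]
    · rw [if_neg h, if_neg (fun h' : i = k => h h'.symm)]

lemma pvInnerFold (matrix : List (List Int)) (r : Nat) (M K : Nat) (g : Nat → List Int)
    (hMK : M ≤ K) :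
    (List.range M).foldl (fun cols (c : Nat) => cols.modify c (pvUpd matrix r c))
        ((List.range K).map g)
      = (List.range K).map (fun c => if c < M then pvUpd matrix r c (g c) else g c) := by
  induction M with
  | zero => simp
  | succ M ih =>
    rw [List.range_succ, List.foldl_append, ih (by omega), List.foldl_cons, List.foldl_nil,
      pvModifyMapRange K M _ _]
    apply List.map_congr_left
    intro c _
    rcases Nat.lt_trichotomy c M with h | h | h
    · rw [if_neg (by omega : ¬ c = M), if_pos h, if_pos (by omega : c < M + 1)]
    · subst h
      rw [if_pos rfl, if_neg (by omega : ¬ c < c), if_pos (by omega : c < c + 1)]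
    · rw [if_neg (by omega : ¬ c = M), if_neg (by omega : ¬ c < M),
        if_neg (by omega : ¬ c < M + 1)]

lemma pvOuterFold (matrix : List (List Int)) (N M : Nat) :
    (List.range N).foldl (fun cols (r : Nat) =>
        (List.range M).foldl (fun cols (c : Nat) => cols.modify c (pvUpd matrix r c)) cols)
        ((List.range M).map (fun _ => ([] : List Int)))
      = (List.range M).map (pvCol matrix N) := by
  induction N with
  | zero =>
    apply List.map_congr_left
    intro c _
    simp [pvCol]
  | succ N ih =>
    rw [List.range_succ, List.foldl_append, ih, List.foldl_cons, List.foldl_nil,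
      pvInnerFold matrix N M M _ (le_refl M)]
    apply List.map_congr_left
    intro c hc
    rw [List.mem_range] at hc
    rw [if_pos hc]
    unfold pvUpd pvCol
    by_cases h : c % 2 = 0 <;> simp [h, List.range_succ]

lemma pvFoldlAppend (ls : List (List Int)) (a : List Int) :
    ls.foldl (fun ans col => ans ++ col) a = a ++ ls.flatten := by
  induction ls generalizing a with
  | nil => simp
  | cons x xs ih => simp [ih, List.append_assoc]

lemma pvCastFold₁ (matrix : List (List Int)) (r : Nat) (M : Nat) (cols : List (List Int)) :
    ((List.range M).map (fun k : Nat => (k : Int))).foldl (fun cols c =>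
        cols.modify c.toNat (fun l =>
          if PySem.Int.mod c 2 = 0 then
            l ++ [PySem.List.pyGetD (PySem.List.pyGetD matrix (r : Int) []) c 0]
          else
            PySem.List.pyGetD (PySem.List.pyGetD matrix (r : Int) []) c 0 :: l)) cols
      = (List.range M).foldl (fun cols (c : Nat) => cols.modify c (pvUpd matrix r c)) cols := by
  rw [List.foldl_map]
  apply PySem.List.foldl_congr_mem
  intro cols c _
  have hpar : (PySem.Int.mod (c : Int) 2 = 0) ↔ (c % 2 = 0) := by
    rw [show (2:Int) = ((2:Nat):Int) by norm_num, PySem.Int.mod_natCast]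
    exact_mod_cast Iff.rfl
  unfold pvUpd pvG
  simp only [Int.toNat_natCast]
  congr 1
  funext l
  by_cases h : c % 2 = 0
  · rw [if_pos (hpar.mpr h), if_pos h]
  · rw [if_neg (fun hh => h (hpar.mp hh)), if_neg h]

lemma pvCanonNil (matrix : List (List Int)) (n m : Int) (h : n ≤ 0 ∨ m ≤ 0) :
    pvCanon matrix n.toNat m.toNat = [] := by
  rcases h with h | h
  · have hn : n.toNat = 0 := Int.toNat_of_nonpos h
    have h1 : ∀ c, (if c % 2 = 0 then List.map (fun r => pvG matrix c r) (List.range n.toNat)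
        else List.map (fun r => pvG matrix c (n.toNat - 1 - r)) (List.range n.toNat))
        = ([] : List Int) := by
      intro c
      rw [hn]
      simp
    simp [pvCanon, h1]
  · have hm : m.toNat = 0 := Int.toNat_of_nonpos h
    simp [pvCanon, hm]

lemma pvB_eq (matrix : List (List Int)) (n m : Int) :
    print_sine_wave_alt matrix n m = pvCanon matrix n.toNat m.toNat := by
  unfold print_sine_wave_alt
  by_cases h0 : n ≤ 0 ∨ m ≤ 0
  · rw [if_pos h0, pvCanonNil matrix n m h0]
  rw [if_neg h0]
  dsimp only
  rw [pvRangeZero n, pvRangeZero m, List.foldl_map]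
  have hfold :
      (List.range n.toNat).foldl (fun cols (r : Nat) =>
        ((List.range m.toNat).map (fun k : Nat => (k : Int))).foldl (fun cols c =>
          cols.modify c.toNat (fun l =>
            if PySem.Int.mod c 2 = 0 then
              l ++ [PySem.List.pyGetD (PySem.List.pyGetD matrix (r : Int) []) c 0]
            else
              PySem.List.pyGetD (PySem.List.pyGetD matrix (r : Int) []) c 0 :: l)) cols)
        ((List.range m.toNat).map (fun _ => ([] : List Int)))
      = (List.range m.toNat).map (pvCol matrix n.toNat) := by
    rw [← pvOuterFold matrix n.toNat m.toNat]
    apply PySem.List.foldl_congr_mem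
    intro cols r _
    exact pvCastFold₁ matrix r m.toNat cols
  rw [show ((List.range m.toNat).map (fun k : Nat => (k : Int))).map (fun _ => ([] : List Int))
        = (List.range m.toNat).map (fun _ => ([] : List Int)) by
          rw [List.map_map]
          exact List.map_congr_left fun _ _ => rfl,
    hfold, pvFoldlAppend, List.nil_append, List.flatten_eq_flatMap, List.flatMap_map]
  simp only [id]
  unfold pvCanon
  apply List.flatMap_congr
  intro c _
  unfold pvCol
  by_cases h : c % 2 = 0
  · simp [h]
  · rw [if_neg h, if_neg h, ← List.map_reverse, pvRevRange, List.map_map]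
    exact List.map_congr_left fun _ _ => rfl

-- ===== VERDICT (by name: the statement is the Claim_ definition above) =====
theorem print_sine_wave_spec : Claim_equal_print_sine_wave := by
  intro matrix n m _ _
  unfold Spec_print_sine_wave
  rw [pvA_eq, pvB_eq]
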